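-- pv_equiv track=rewrite | github.com/mashida/learn-python | 2024.10.11/task_02.py | join_similar_segments
-- ===== SOURCE A (Python) =====
-- def join_similar_segments(segments: list[str], seps: set[str]) -> list[str]:
--     if not segments:
--         return []
--
--     result: list[str] = ['']
--     for segment in segments:
--         result[-1] += segment
--         if segment.strip()[-1] in seps and segment is not segments[-1]:
--             result.append('')
--
--     return result
-- ===== SOURCE B (Python) =====
-- def join_similar_segments(segments: list[str], seps: set[str]) -> list[str]:
--     if not segments:
--         return []
--
--     n = len(segments)
--     breaks = [i for i in range(n)
--               if segments[i].strip()[-1] in seps and i != n - 1]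
--
--     result: list[str] = []
--     start = 0
--     for b in breaks:
--         result.append(''.join(segments[start:b + 1]))
--         start = b + 1
--     result.append(''.join(segments[start:]))
--     return result
-- ===== Notes on version B (the rewrite author's own statement) =====
-- stated objective: alternative
-- what changed: B first collects the break indices (segments whose stripped last character is a separator, except the last segment) and then builds each group by slicing the segment list and joining once, instead of A's single pass that grows the last result string in place.
-- outside the precondition, e.g. on join_similar_segments(['c', 'z_x', 'c'], {'c', 'c1'}): A returns ['cz_xc'], B returns ['c', 'z_xc']
import Mathlib
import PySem

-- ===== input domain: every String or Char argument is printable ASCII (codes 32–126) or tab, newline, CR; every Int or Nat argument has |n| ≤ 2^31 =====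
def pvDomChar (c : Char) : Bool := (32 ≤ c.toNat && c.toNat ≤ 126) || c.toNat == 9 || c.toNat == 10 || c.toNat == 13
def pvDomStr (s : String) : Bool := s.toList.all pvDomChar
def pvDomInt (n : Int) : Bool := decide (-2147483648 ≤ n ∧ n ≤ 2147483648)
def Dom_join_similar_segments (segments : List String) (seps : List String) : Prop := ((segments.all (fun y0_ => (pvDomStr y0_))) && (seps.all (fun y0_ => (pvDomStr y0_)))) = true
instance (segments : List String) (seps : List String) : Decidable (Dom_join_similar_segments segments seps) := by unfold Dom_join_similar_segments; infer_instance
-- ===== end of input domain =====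

-- B replaces A's accumulate-as-you-go pass (growing the last result string in place) by first
-- collecting the break indices and then slicing-and-joining the segment list between them
-- (objective: alternative decomposition, same cost).

-- ===== PORT A =====
-- loop body of A's for-loop: result[-1] += segment; if segment.strip()[-1] in seps and
-- segment is not segments[-1]: result.append('').  'result' is kept as (finished, last).
-- Python's identity test 'segment is not segments[-1]' is ported as value inequality; on every
-- input admitted by Pre_ (no earlier segment equal by value to the last one ends in a separator)
-- the two coincide.
def aStep (seps : List String) (lastSeg : String) (result : List String × String) (segment : String) : List String × String :=
  let result := (result.1, result.2 ++ segment)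
  match PySem.Str.pyGet? (PySem.Str.strip segment) (-1) with
  | none => result      -- Python raises IndexError here; such inputs are outside Pre_
  | some c => if String.ofList [c] ∈ seps ∧ segment ≠ lastSeg then (result.1 ++ [result.2], "") else result

def join_similar_segments (segments : List String) (seps : List String) : List String :=
  if segments = [] then []
  else
    let lastSeg := (PySem.List.pyGet? segments (-1)).getD ""
    let fin := segments.foldl (aStep seps lastSeg) ([], "")
    fin.1 ++ [fin.2]

-- ===== PORT B =====
-- B's break-index predicate: segments[i].strip()[-1] in seps and i != len(segments) - 1
def bCond (seps : List String) (segments : List String) (n : Nat) (i : Nat) : Bool :=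
  (match PySem.Str.pyGet? (PySem.Str.strip ((PySem.List.pyGet? segments (i : Int)).getD "")) (-1) with
   | none => false      -- Python raises IndexError here; such inputs are outside Pre_
   | some c => decide (String.ofList [c] ∈ seps)) && i != n - 1

-- B's assembling loop body: result.append(''.join(segments[start:b+1])); start = b+1
def bStep (segments : List String) (st : List String × Nat) (b : Nat) : List String × Nat :=
  (st.1 ++ [PySem.Str.join "" (PySem.List.slice segments (some (st.2 : Int)) (some ((b : Int) + 1)))], b + 1)

def join_similar_segments_alt (segments : List String) (seps : List String) : List String :=
  if segments = [] then []
  else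
    let n := segments.length
    let breaks := (List.range n).filter (bCond seps segments n)
    let st := breaks.foldl (bStep segments) ([], 0)
    st.1 ++ [PySem.Str.join "" (PySem.List.slice segments (some (st.2 : Int)) none)]

-- ===== PRECONDITION & SPEC =====
-- does segment s end (after strip) in one of the separators? (false where Python would raise)
def pvBrk (seps : List String) (s : String) : Bool :=
  match PySem.Str.pyGet? (PySem.Str.strip s) (-1) with
  | none => false
  | some c => decide (String.ofList [c] ∈ seps)

-- Pre_ excludes (a) inputs with a segment that strips to '' — A raises IndexError there — and
-- (b) lists where some non-last segment ending in a separator is equal (by value) to the last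
-- segment: there A's result depends on CPython string-interning via the identity test
-- 'segment is not segments[-1]', an accident no implementation should reproduce.
def Pre_join_similar_segments (segments : List String) (seps : List String) : Prop :=
  (∀ s ∈ segments, PySem.Str.strip s ≠ "") ∧
  (∀ s ∈ segments.dropLast, pvBrk seps s = true → segments.getLast? ≠ some s)
instance (segments : List String) (seps : List String) : Decidable (Pre_join_similar_segments segments seps) := by unfold Pre_join_similar_segments; infer_instance

def pvWitness_join_similar_segments : List String × List String := (["ab. ", "cd", "e;", "f"], [".", ";"])

def Spec_join_similar_segments (segments : List String) (seps : List String) (out : List String) : Prop := out = join_similar_segments_alt segments seps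
instance (segments : List String) (seps : List String) (out : List String) : Decidable (Spec_join_similar_segments segments seps out) := by unfold Spec_join_similar_segments; infer_instance

-- ===== CLAIM (what is proved, stated in full; the proofs are below) =====
def Claim_equal_join_similar_segments : Prop := ∀ (segments : List String) (seps : List String), Dom_join_similar_segments segments seps → Pre_join_similar_segments segments seps → Spec_join_similar_segments segments seps (join_similar_segments segments seps)

-- ===== LEMMAS AND PROOFS =====

-- common specification: left-to-right grouping with the current group's accumulated string
def Gspec (p : String → Bool) : List String → String → List String
  | [], cur => [cur]
  | x :: rest, cur =>
      if p x && !rest.isEmpty then (cur ++ x) :: Gspec p rest "" else Gspec p rest (cur ++ x)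

theorem chars_join_nil_cons (x : List Char) (l : List (List Char)) :
    PySem.Chars.join [] (x :: l) = x ++ PySem.Chars.join [] l := by
  cases l with
  | nil => simp [PySem.Chars.join, List.intercalate]
  | cons y t => simp [PySem.Chars.join_cons_cons]

theorem sjoin_cons (x : String) (l : List String) :
    PySem.Str.join "" (x :: l) = x ++ PySem.Str.join "" l := by
  apply String.toList_inj.mp
  simp [PySem.Str.toList_join, chars_join_nil_cons]

theorem sjoin_nil : PySem.Str.join "" ([] : List String) = "" := by decide

-- ===== A-side =====

theorem aFold_eq (seps : List String) (lastSeg : String) :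
    ∀ (xs : List String) (acc : List String) (cur : String),
      (∀ s ∈ xs.dropLast, pvBrk seps s = true → s ≠ lastSeg) →
      (xs = [] ∨ xs.getLast? = some lastSeg) →
      ((xs.foldl (aStep seps lastSeg) (acc, cur)).1 ++ [(xs.foldl (aStep seps lastSeg) (acc, cur)).2])
        = acc ++ Gspec (pvBrk seps) xs cur := by
  intro xs
  induction xs with
  | nil => intro acc cur _ _; simp [Gspec]
  | cons x rest ih =>
    intro acc cur h1 h2
    have hstep : aStep seps lastSeg (acc, cur) x =
        if pvBrk seps x && decide (x ≠ lastSeg) then (acc ++ [cur ++ x], "") else (acc, cur ++ x) := by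
      unfold aStep pvBrk
      cases PySem.Str.pyGet? (PySem.Str.strip x) (-1) with
      | none => simp
      | some c => by_cases hm : String.ofList [c] ∈ seps <;> by_cases hx : x = lastSeg <;> simp [hm, hx]
    cases rest with
    | nil =>
      have hx : x = lastSeg := by
        rcases h2 with h | h
        · simp at h
        · simpa using h
      subst hx
      rw [List.foldl_cons, hstep, if_neg (by simp)]
      simp [Gspec]
    | cons y t =>
      have hrest1 : ∀ s ∈ (y :: t).dropLast, pvBrk seps s = true → s ≠ lastSeg := by
        intro s hs hb
        exact h1 s (by simp [List.dropLast_cons_of_ne_nil]; right; exact hs) hb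
      have hrest2 : (y :: t) = [] ∨ (y :: t).getLast? = some lastSeg := by
        rcases h2 with h | h
        · simp at h
        · right; simpa [List.getLast?_cons_cons] using h
      by_cases hb : pvBrk seps x = true
      · have hxl : x ≠ lastSeg := by
          apply h1 x _ hb
          simp [List.dropLast_cons_of_ne_nil]
        rw [List.foldl_cons, hstep, if_pos (by simp [hb, hxl])]
        rw [ih (acc ++ [cur ++ x]) "" hrest1 hrest2]
        simp [Gspec, hb]
      · have hb' : pvBrk seps x = false := by simpa using hb
        rw [List.foldl_cons, hstep, if_neg (by simp [hb'])]
        rw [ih acc (cur ++ x) hrest1 hrest2]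
        simp [Gspec, hb']

-- ===== B-side =====

theorem breaks_cons (seps : List String) (x : String) (rest : List String) :
    (List.range (x :: rest).length).filter (bCond seps (x :: rest) (x :: rest).length)
      = (if pvBrk seps x && !rest.isEmpty then [0] else [])
        ++ ((List.range rest.length).filter (bCond seps rest rest.length)).map (· + 1) := by
  have hr : List.range (x :: rest).length = 0 :: (List.range rest.length).map (· + 1) := by
    simp [List.range_succ_eq_map]
  rw [hr, List.filter_cons]
  have h0 : bCond seps (x :: rest) (x :: rest).length 0 = (pvBrk seps x && !rest.isEmpty) := by
    have hget0 : (PySem.List.pyGet? (x :: rest) ((0 : Nat) : Int)).getD "" = x := by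
      simp
    have hlen : ((0 : Nat) != (x :: rest).length - 1) = !rest.isEmpty := by
      cases rest <;> simp
    unfold bCond pvBrk
    rw [hget0, hlen]
  have hmap : ((List.range rest.length).map (· + 1)).filter (bCond seps (x :: rest) (x :: rest).length)
      = ((List.range rest.length).filter (bCond seps rest rest.length)).map (· + 1) := by
    rw [List.filter_map]
    apply congrArg (List.map (· + 1))
    apply List.filter_congr
    intro i hi
    have hi' : i < rest.length := List.mem_range.mp hi
    have hget : (PySem.List.pyGet? (x :: rest) (((i + 1 : Nat)) : Int)).getD ""
        = (PySem.List.pyGet? rest ((i : Nat) : Int)).getD "" := by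
      simp
    have hne : ((i + 1) != (x :: rest).length - 1) = (i != rest.length - 1) := by
      apply Bool.eq_iff_iff.mpr
      simp only [bne_iff_ne, ne_eq, List.length_cons, Nat.add_sub_cancel]
      omega
    simp only [Function.comp_apply]
    unfold bCond
    rw [hget, hne]
  rw [h0, hmap]
  split_ifs with hcond <;> simp

theorem bfold_acc (segs : List String) :
    ∀ (bs : List Nat) (acc : List String) (s : Nat),
      bs.foldl (bStep segs) (acc, s)
        = (acc ++ (bs.foldl (bStep segs) ([], s)).1, (bs.foldl (bStep segs) ([], s)).2) := by
  intro bs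
  induction bs with
  | nil => intro acc s; simp
  | cons b bs ih =>
    intro acc s
    rw [List.foldl_cons, List.foldl_cons]
    have h1 : bStep segs (acc, s) b
        = (acc ++ [PySem.Str.join "" (PySem.List.slice segs (some (s : Int)) (some ((b : Int) + 1)))], b + 1) := rfl
    have h2 : bStep segs (([] : List String), s) b
        = ([PySem.Str.join "" (PySem.List.slice segs (some (s : Int)) (some ((b : Int) + 1)))], b + 1) := rfl
    rw [h1, h2, ih (acc ++ [PySem.Str.join "" (PySem.List.slice segs (some (s : Int)) (some ((b : Int) + 1)))]) (b + 1),
        ih [PySem.Str.join "" (PySem.List.slice segs (some (s : Int)) (some ((b : Int) + 1)))] (b + 1)]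
    simp

theorem slice_natCast' (xs : List String) (a b : Nat) :
    PySem.List.slice xs (some (a : Int)) (some (b : Int)) = (xs.drop a).take (b - a) :=
  PySem.List.slice_natCast xs a b

theorem bfold_shift (x : String) (rest : List String) :
    ∀ (bs : List Nat) (acc : List String) (s : Nat),
      (bs.map (· + 1)).foldl (bStep (x :: rest)) (acc, s + 1)
        = (acc ++ (bs.foldl (bStep rest) ([], s)).1, (bs.foldl (bStep rest) ([], s)).2 + 1) := by
  intro bs
  induction bs with
  | nil => intro acc s; simp
  | cons b bs ih =>
    intro acc s
    rw [List.map_cons, List.foldl_cons, List.foldl_cons]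
    have h1 : bStep (x :: rest) (acc, s + 1) (b + 1)
        = (acc ++ [PySem.Str.join "" (PySem.List.slice (x :: rest) (some ((s + 1 : Nat) : Int)) (some (((b + 1 : Nat) : Int) + 1)))], b + 2) := rfl
    have h2 : bStep rest (([] : List String), s) b
        = ([PySem.Str.join "" (PySem.List.slice rest (some ((s : Nat) : Int)) (some (((b : Nat) : Int) + 1)))], b + 1) := rfl
    have hsl : PySem.List.slice (x :: rest) (some ((s + 1 : Nat) : Int)) (some (((b + 1 : Nat) : Int) + 1))
        = PySem.List.slice rest (some (s : Nat)) (some ((b : Nat) + 1)) := by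
      have h1 : (((b + 1 : Nat) : Int) + 1) = ((b + 2 : Nat) : Int) := by push_cast; ring
      have h2 : (((b : Nat) : Int) + 1) = ((b + 1 : Nat) : Int) := by push_cast; ring
      rw [h1, h2, slice_natCast', slice_natCast']
      simp only [List.drop_succ_cons]
      congr 1
      omega
    rw [h1, h2, hsl]
    rw [show (b + 2) = (b + 1) + 1 from rfl]
    rw [ih (acc ++ [PySem.Str.join "" (PySem.List.slice rest (some ((s : Nat) : Int)) (some (((b : Nat) : Int) + 1)))]) (b + 1)]
    rw [bfold_acc rest bs [PySem.Str.join "" (PySem.List.slice rest (some ((s : Nat) : Int)) (some (((b : Nat) : Int) + 1)))] (b + 1)]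
    simp

-- Gspec with a nonempty current prefix = prefix glued onto the head of Gspec with ""
theorem Gspec_prepend (p : String → Bool) :
    ∀ (xs : List String) (cur : String),
      Gspec p xs cur = (cur ++ (Gspec p xs "").headD "") :: (Gspec p xs "").tail := by
  intro xs
  induction xs with
  | nil => intro cur; simp [Gspec]
  | cons x rest ih =>
    intro cur
    by_cases hb : (p x && !rest.isEmpty) = true
    · simp [Gspec, hb, String.empty_append]
    · have hb' : (p x && !rest.isEmpty) = false := by simpa using hb
      simp only [Gspec, hb', Bool.false_eq_true, if_false]
      rw [ih (cur ++ x), ih ("" ++ x)]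
      simp [String.empty_append, String.append_assoc]

theorem bMain (seps : List String) :
    ∀ (xs : List String),
      (((List.range xs.length).filter (bCond seps xs xs.length)).foldl (bStep xs) ([], 0)).1
        ++ [PySem.Str.join "" (PySem.List.slice xs
              (some (((((List.range xs.length).filter (bCond seps xs xs.length)).foldl (bStep xs) ([], 0)).2 : Nat) : Int)) none)]
      = Gspec (pvBrk seps) xs "" := by
  intro xs
  induction xs with
  | nil => simp [Gspec, sjoin_nil]
  | cons x rest ih =>
    rw [breaks_cons]
    by_cases hb : (pvBrk seps x && !rest.isEmpty) = true
    · -- break right after x: first chunk is [x] alone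
      simp only [hb, if_true, List.cons_append, List.nil_append]
      rw [List.foldl_cons]
      have hstep0 : bStep (x :: rest) ([], 0) 0 = ([x], 1) := by
        unfold bStep
        have : PySem.List.slice (x :: rest) (some ((0 : Nat) : Int)) (some (((0 : Nat) : Int) + 1))
            = [x] := by
          have h2 : (((0 : Nat) : Int) + 1) = ((1 : Nat) : Int) := by norm_num
          rw [h2, slice_natCast']
          simp
        rw [this]
        simp [sjoin_cons, sjoin_nil]
      rw [hstep0]
      have := bfold_shift x rest ((List.range rest.length).filter (bCond seps rest rest.length)) [x] 0
      rw [this]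
      simp only [List.cons_append, List.nil_append]
      have hdrop : PySem.List.slice (x :: rest)
          (some (((((List.range rest.length).filter (bCond seps rest rest.length)).foldl (bStep rest) ([], 0)).2 + 1 : Nat) : Int)) none
          = PySem.List.slice rest
          (some (((((List.range rest.length).filter (bCond seps rest rest.length)).foldl (bStep rest) ([], 0)).2 : Nat) : Int)) none := by
        rw [PySem.List.slice_from_natCast, PySem.List.slice_from_natCast]
        exact List.drop_succ_cons
      rw [hdrop]
      have hg : Gspec (pvBrk seps) (x :: rest) "" = x :: Gspec (pvBrk seps) rest "" := by
        simp [Gspec, hb]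
      rw [hg, ← ih]
    · -- no break after x: x is glued onto the first chunk of the rest
      have hb' : (pvBrk seps x && !rest.isEmpty) = false := by simpa using hb
      rw [hb']
      simp only [Bool.false_eq_true, if_false, List.nil_append]
      have htail : Gspec (pvBrk seps) (x :: rest) "" = Gspec (pvBrk seps) rest x := by
        simp [Gspec, hb', String.empty_append]
      rw [htail, Gspec_prepend (pvBrk seps) rest x, ← ih]
      cases hbs : (List.range rest.length).filter (bCond seps rest rest.length) with
      | nil =>
        simp only [List.map_nil, List.foldl_nil]
        rw [PySem.List.slice_from_natCast, PySem.List.slice_from_natCast]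
        simp [sjoin_cons]
      | cons b bs =>
        rw [List.map_cons, List.foldl_cons, List.foldl_cons]
        have hstep1 : bStep (x :: rest) ([], 0) (b + 1)
            = ([x ++ PySem.Str.join "" (PySem.List.slice rest (some ((0 : Nat) : Int)) (some (((b : Nat) : Int) + 1)))], b + 2) := by
          unfold bStep
          have h1 : (((b + 1 : Nat) : Int) + 1) = ((b + 2 : Nat) : Int) := by push_cast; ring
          have h2 : (((b : Nat) : Int) + 1) = ((b + 1 : Nat) : Int) := by push_cast; ring
          rw [h1, h2, slice_natCast', slice_natCast']
          simp only [List.drop_zero, Nat.sub_zero, List.take_succ_cons, sjoin_cons]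
          simp
        have hstep1' : bStep rest ([], 0) b
            = ([PySem.Str.join "" (PySem.List.slice rest (some ((0 : Nat) : Int)) (some (((b : Nat) : Int) + 1)))], b + 1) := by
          unfold bStep
          simp
        rw [hstep1, hstep1']
        rw [show (b + 2) = (b + 1) + 1 from rfl]
        rw [bfold_shift x rest bs [x ++ PySem.Str.join "" (PySem.List.slice rest (some ((0 : Nat) : Int)) (some (((b : Nat) : Int) + 1)))] (b + 1)]
        rw [bfold_acc rest bs [PySem.Str.join "" (PySem.List.slice rest (some ((0 : Nat) : Int)) (some (((b : Nat) : Int) + 1)))] (b + 1)]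
        have hdrop : ∀ k : Nat, PySem.List.slice (x :: rest) (some ((k + 1 : Nat) : Int)) none
            = PySem.List.slice rest (some ((k : Nat) : Int)) none := by
          intro k
          rw [PySem.List.slice_from_natCast, PySem.List.slice_from_natCast]
          simp
        rw [hdrop]
        cases hfold : (bs.foldl (bStep rest) ([], b + 1)).1 with
        | nil => simp
        | cons h t => simp

-- ===== VERDICT (by name: the statement is the Claim_ definition above) =====
theorem join_similar_segments_spec : Claim_equal_join_similar_segments := by
  unfold Claim_equal_join_similar_segments
  intro segments seps _ hpre
  unfold Spec_join_similar_segments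
  unfold join_similar_segments join_similar_segments_alt
  by_cases hnil : segments = []
  · simp [hnil]
  · simp only [hnil, if_false]
    obtain ⟨l, hl⟩ : ∃ l, segments.getLast? = some l := by
      cases h : segments.getLast? with
      | none => exact absurd (List.getLast?_eq_none_iff.mp h) hnil
      | some l => exact ⟨l, rfl⟩
    have hlast : (PySem.List.pyGet? segments (-1)).getD "" = l := by
      rw [PySem.List.pyGet?_neg_one, hl]
      rfl
    rw [hlast]
    have h1 : ∀ s ∈ segments.dropLast, pvBrk seps s = true → s ≠ l := by
      intro s hs hb heq
      exact hpre.2 s hs hb (by rw [hl, heq])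
    rw [aFold_eq seps l segments [] "" h1 (Or.inr hl)]
    rw [bMain seps segments]
    simp
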